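-- pv_equiv track=rewrite | github.com/fobe-projects/meshtastic-firmware | bin/gen-t9-dict.py | word_to_t9_sequence
-- ===== SOURCE A (Python) =====
-- def char_to_t9_key(c):
--     """Convert a character to its T9 key (2-9)"""
--     c = c.lower()
--     if c in "abc":
--         return "2"
--     if c in "def":
--         return "3"
--     if c in "ghi":
--         return "4"
--     if c in "jkl":
--         return "5"
--     if c in "mno":
--         return "6"
--     if c in "pqrs":
--         return "7"
--     if c in "tuv":
--         return "8"
--     if c in "wxyz":
--         return "9"
--     return None
--
-- def word_to_t9_sequence(word):
--     """Convert a word to its T9 key sequence"""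
--     seq = ""
--     for c in word.lower():
--         key = char_to_t9_key(c)
--         if key is None:
--             return None  # Invalid character
--         seq += key
--     return seq
-- ===== SOURCE B (Python) =====
-- _GROUPS = (("abc", "2"), ("def", "3"), ("ghi", "4"), ("jkl", "5"),
--            ("mno", "6"), ("pqrs", "7"), ("tuv", "8"), ("wxyz", "9"))
--
-- def word_to_t9_sequence(word):
--     """Convert a word to its T9 key sequence"""
--     if word and not word.isalpha():
--         return None  # Invalid character somewhere
--     seq = word.lower()
--     for letters, digit in _GROUPS:
--         for ch in letters:
--             seq = seq.replace(ch, digit)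
--     return seq
-- ===== Notes on version B (the rewrite author's own statement) =====
-- stated objective: faster
-- what changed: A classifies each character with a chain of membership tests inside one fused loop with early return and string concatenation; B instead validates the whole word once with isalpha and then produces the digits by eight staged whole-string replace passes (one per keypad group), with no per-character Python-level branching.
import Mathlib
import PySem

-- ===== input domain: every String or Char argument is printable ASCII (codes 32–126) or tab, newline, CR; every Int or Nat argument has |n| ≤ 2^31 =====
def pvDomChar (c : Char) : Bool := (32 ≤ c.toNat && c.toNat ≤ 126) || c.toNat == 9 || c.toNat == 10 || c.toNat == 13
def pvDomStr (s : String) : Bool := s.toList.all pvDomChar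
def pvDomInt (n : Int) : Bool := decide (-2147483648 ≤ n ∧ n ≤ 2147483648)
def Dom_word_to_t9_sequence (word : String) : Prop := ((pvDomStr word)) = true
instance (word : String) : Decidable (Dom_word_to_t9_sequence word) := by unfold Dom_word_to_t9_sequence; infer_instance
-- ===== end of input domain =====

-- B replaces A's fused per-char classification loop (membership-test chain, early return, string +=) by one isalpha validation of the whole word followed by eight staged whole-string replace passes, one per keypad group (alternative decomposition; return-value equivalence).


-- ===== PORT A =====
-- `c in "abc"` on a single character is character membership (exact here since c is one char)
def char_to_t9_key (c : Char) : Option String :=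
  let c := PySem.Chars.lowerChar c
  if c ∈ ['a', 'b', 'c'] then some "2"
  else if c ∈ ['d', 'e', 'f'] then some "3"
  else if c ∈ ['g', 'h', 'i'] then some "4"
  else if c ∈ ['j', 'k', 'l'] then some "5"
  else if c ∈ ['m', 'n', 'o'] then some "6"
  else if c ∈ ['p', 'q', 'r', 's'] then some "7"
  else if c ∈ ['t', 'u', 'v'] then some "8"
  else if c ∈ ['w', 'x', 'y', 'z'] then some "9"
  else none

-- the `for c in word.lower()` loop; seq kept as List Char (String.ofList at the end) so the kernel can unfold it
def t9LoopA : List Char → List Char → Option String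
  | [], seq => some (String.ofList seq)
  | c :: rest, seq =>
      match char_to_t9_key c with
      | none => none
      | some key => t9LoopA rest (seq ++ key.toList)

def word_to_t9_sequence (word : String) : Option String :=
  t9LoopA (PySem.Chars.lower word.toList) []

-- ===== PORT B =====
-- the tuple _GROUPS of Source B
def t9Groups : List (List Char × Char) :=
  [(['a','b','c'],'2'), (['d','e','f'],'3'), (['g','h','i'],'4'), (['j','k','l'],'5'),
   (['m','n','o'],'6'), (['p','q','r','s'],'7'), (['t','u','v'],'8'), (['w','x','y','z'],'9')]

-- `if word and not word.isalpha(): return None`, then `seq = word.lower()` and the two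
-- nested for-loops of replace passes (seq kept as List Char, String.ofList at the end)
def word_to_t9_sequence_alt (word : String) : Option String :=
  if !word.toList.isEmpty && !PySem.Chars.strIsalpha word.toList then none
  else
    some (String.ofList (t9Groups.foldl
      (fun s p => p.1.foldl (fun s ch => PySem.Chars.replace s [ch] [p.2]) s)
      (PySem.Chars.lower word.toList)))

-- ===== PRECONDITION & SPEC =====
def Spec_word_to_t9_sequence (word : String) (out : Option String) : Prop := out = word_to_t9_sequence_alt word
instance (word : String) (out : Option String) : Decidable (Spec_word_to_t9_sequence word out) := by unfold Spec_word_to_t9_sequence; infer_instance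

-- ===== CLAIM (what is proved, stated in full; the proofs are below) =====
def Claim_equal_word_to_t9_sequence : Prop := ∀ (word : String), Dom_word_to_t9_sequence word → Spec_word_to_t9_sequence word (word_to_t9_sequence word)

-- ===== LEMMAS AND PROOFS =====

theorem upper_range (c : Char) (h : PySem.Chars.isupper c = true) : 65 ≤ c.toNat ∧ c.toNat ≤ 90 := by
  unfold PySem.Chars.isupper at h
  simp only [Bool.and_eq_true, decide_eq_true_eq, Char.le_def, UInt32.le_iff_toNat_le] at h
  have e1 : ('A').val.toNat = 65 := rfl
  have e2 : ('Z').val.toNat = 90 := rfl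
  rw [e1, e2] at h
  exact h

theorem lowerChar_toNat_of_upper (c : Char) (h : PySem.Chars.isupper c = true) :
    (PySem.Chars.lowerChar c).toNat = c.toNat + 32 := by
  have hb := upper_range c h
  have hval : (c.toNat + 32).isValidChar := by left; omega
  unfold PySem.Chars.lowerChar
  rw [if_pos h]
  show (Char.ofNat (c.toNat + 32)).val.toNat = c.toNat + 32
  simp [Char.ofNat, hval, Char.ofNatAux]
  omega

theorem lowerChar_of_not_upper (c : Char) (h : ¬ PySem.Chars.isupper c = true) :
    PySem.Chars.lowerChar c = c := by
  unfold PySem.Chars.lowerChar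
  rw [if_neg h]

theorem isupper_lowerChar (c : Char) : PySem.Chars.isupper (PySem.Chars.lowerChar c) = false := by
  by_cases h : PySem.Chars.isupper c = true
  · have ht := lowerChar_toNat_of_upper c h
    have hb := upper_range c h
    unfold PySem.Chars.isupper
    simp only [Bool.and_eq_false_iff, decide_eq_false_iff_not, Char.le_def, UInt32.le_iff_toNat_le, not_le]
    right
    have e2 : ('Z').val.toNat = 90 := rfl
    rw [e2]
    show 90 < (PySem.Chars.lowerChar c).val.toNat
    have : (PySem.Chars.lowerChar c).val.toNat = c.toNat + 32 := ht
    omega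
  · rw [lowerChar_of_not_upper c h]
    cases hh : PySem.Chars.isupper c
    · rfl
    · exact absurd hh h

theorem lowerChar_idem (c : Char) :
    PySem.Chars.lowerChar (PySem.Chars.lowerChar c) = PySem.Chars.lowerChar c := by
  apply lowerChar_of_not_upper
  simp [isupper_lowerChar]

theorem isalpha_lowerChar (c : Char) :
    PySem.Chars.isalpha (PySem.Chars.lowerChar c) = PySem.Chars.isalpha c := by
  by_cases h : PySem.Chars.isupper c = true
  · have ht := lowerChar_toNat_of_upper c h
    have hb := upper_range c h
    have hlow : PySem.Chars.islower (PySem.Chars.lowerChar c) = true := by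
      unfold PySem.Chars.islower
      simp only [Bool.and_eq_true, decide_eq_true_eq, Char.le_def, UInt32.le_iff_toNat_le]
      have e1 : ('a').val.toNat = 97 := rfl
      have e2 : ('z').val.toNat = 122 := rfl
      rw [e1, e2]
      have : (PySem.Chars.lowerChar c).val.toNat = c.toNat + 32 := ht
      omega
    unfold PySem.Chars.isalpha
    rw [hlow, h]
    simp
  · rw [lowerChar_of_not_upper c h]

theorem mem_of_lower (c : Char) (h1 : 'a' ≤ c) (h2 : c ≤ 'z') :
    c ∈ ['a','b','c','d','e','f','g','h','i','j','k','l','m','n','o','p','q','r','s','t','u','v','w','x','y','z'] := by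
  have h1' : 97 ≤ c.toNat := h1
  have h2' : c.toNat ≤ 122 := h2
  have hc : c = Char.ofNat c.toNat := (Char.ofNat_toNat c).symm
  interval_cases h : c.toNat <;> rw [hc] <;> decide

-- single-character str.replace is a pointwise substitution
theorem go_single (a b : Char) : ∀ (fuel : Nat) (l acc : List Char), l.length ≤ fuel →
    PySem.Chars.replace.go [a] [b] fuel l acc
      = acc.reverse ++ l.map (fun c => if c = a then b else c) := by
  intro fuel
  induction fuel with
  | zero =>
    intro l acc hl
    have : l = [] := List.length_eq_zero_iff.mp (Nat.le_zero.mp hl)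
    subst this
    simp [PySem.Chars.replace.go]
  | succ n ih =>
    intro l acc hl
    cases l with
    | nil => simp [PySem.Chars.replace.go]
    | cons c t =>
      by_cases hca : c = a
      · subst hca
        have hpre : [c].isPrefixOf (c :: t) = true := by simp [List.isPrefixOf]
        simp only [PySem.Chars.replace.go, hpre, if_pos]
        have hlen : t.length ≤ n := by simpa using hl
        have := ih t (b :: acc) hlen
        simp only [List.length_cons, List.drop_succ_cons, List.length_nil, List.drop_zero,
                   List.reverse_cons, List.reverse_nil, List.nil_append, List.singleton_append] at this ⊢
        rw [this]
        simp
      · have hpre : [a].isPrefixOf (c :: t) = false := by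
          simp [List.isPrefixOf]
          exact fun h => absurd h.symm hca
        simp only [PySem.Chars.replace.go, hpre]
        rw [if_neg (by simp)]
        have := ih t (c :: acc) (by simpa using Nat.lt_succ_iff.mp (by simpa using hl))
        rw [this]
        simp [hca]

theorem replace_single (a b : Char) (l : List Char) :
    PySem.Chars.replace l [a] [b] = l.map (fun c => if c = a then b else c) := by
  unfold PySem.Chars.replace
  simp only [List.isEmpty_cons, if_false, Bool.false_eq_true]
  exact go_single a b l.length l [] (le_refl _)

-- one group's inner for-loop of replaces is a pointwise fold
theorem inner_fold (chs : List Char) (d : Char) : ∀ (s : List Char),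
    chs.foldl (fun s ch => PySem.Chars.replace s [ch] [d]) s
      = s.map (fun c => chs.foldl (fun c ch => if c = ch then d else c) c) := by
  induction chs with
  | nil => intro s; simp
  | cons ch rest ih =>
    intro s
    simp only [List.foldl_cons]
    rw [replace_single, ih, List.map_map]
    rfl

-- the whole staged pass structure is one pointwise map
theorem outer_fold (gs : List (List Char × Char)) : ∀ (l : List Char),
    gs.foldl (fun s p => p.1.foldl (fun s ch => PySem.Chars.replace s [ch] [p.2]) s) l
      = l.map (fun c => gs.foldl (fun c p => p.1.foldl (fun c ch => if c = ch then p.2 else c) c) c) := by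
  induction gs with
  | nil => intro l; simp
  | cons g rest ih =>
    intro l
    simp only [List.foldl_cons]
    rw [inner_fold, ih, List.map_map]
    rfl

-- the character substitution B's replace passes implement (proof-side abbreviation)
def t9Sub (c : Char) : Char :=
  t9Groups.foldl (fun c p => p.1.foldl (fun c ch => if c = ch then p.2 else c) c) c

-- A's per-char helper on an already-lowercase character, phrased through B's substitution
theorem key_char (c : Char) (hfix : PySem.Chars.lowerChar c = c) :
    char_to_t9_key c
      = if PySem.Chars.isalpha c then some (String.ofList [t9Sub c]) else none := by
  by_cases halpha : PySem.Chars.isalpha c = true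
  · rw [if_pos halpha]
    have hlow : PySem.Chars.islower c = true := by
      unfold PySem.Chars.isalpha at halpha
      rcases Bool.or_eq_true_iff.mp halpha with hup | hlo
      · exfalso
        have := lowerChar_toNat_of_upper c hup
        rw [hfix] at this
        omega
      · exact hlo
    unfold PySem.Chars.islower at hlow
    simp only [Bool.and_eq_true, decide_eq_true_eq] at hlow
    have hmem := mem_of_lower c hlow.1 hlow.2
    simp only [List.mem_cons, List.not_mem_nil, or_false] at hmem
    rcases hmem with h|h|h|h|h|h|h|h|h|h|h|h|h|h|h|h|h|h|h|h|h|h|h|h|h|h <;> subst h <;> decide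
  · rw [if_neg halpha]
    have halpha' : PySem.Chars.isalpha c = false := by
      cases h : PySem.Chars.isalpha c
      · rfl
      · exact absurd h halpha
    have hne : ∀ x ∈ ['a','b','c','d','e','f','g','h','i','j','k','l','m','n','o','p','q','r','s','t','u','v','w','x','y','z'], c ≠ x := by
      intro x hx he
      rw [he] at halpha'
      fin_cases hx <;> exact absurd halpha' (by decide)
    simp only [List.mem_cons, List.not_mem_nil, or_false] at hne
    have n1 := hne 'a' (by simp); have n2 := hne 'b' (by simp); have n3 := hne 'c' (by simp)
    have n4 := hne 'd' (by simp); have n5 := hne 'e' (by simp); have n6 := hne 'f' (by simp)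
    have n7 := hne 'g' (by simp); have n8 := hne 'h' (by simp); have n9 := hne 'i' (by simp)
    have n10 := hne 'j' (by simp); have n11 := hne 'k' (by simp); have n12 := hne 'l' (by simp)
    have n13 := hne 'm' (by simp); have n14 := hne 'n' (by simp); have n15 := hne 'o' (by simp)
    have n16 := hne 'p' (by simp); have n17 := hne 'q' (by simp); have n18 := hne 'r' (by simp)
    have n19 := hne 's' (by simp); have n20 := hne 't' (by simp); have n21 := hne 'u' (by simp)
    have n22 := hne 'v' (by simp); have n23 := hne 'w' (by simp); have n24 := hne 'x' (by simp)
    have n25 := hne 'y' (by simp); have n26 := hne 'z' (by simp)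
    simp [char_to_t9_key, hfix, n1,n2,n3,n4,n5,n6,n7,n8,n9,n10,n11,n12,n13,
          n14,n15,n16,n17,n18,n19,n20,n21,n22,n23,n24,n25,n26]

-- characterisation of A's loop on an already-lowercase string
theorem loopA_eq (l : List Char) (hl : ∀ x ∈ l, PySem.Chars.lowerChar x = x) (acc : List Char) :
    t9LoopA l acc
      = if l.all PySem.Chars.isalpha then some (String.ofList (acc ++ l.map t9Sub)) else none := by
  induction l generalizing acc with
  | nil => simp [t9LoopA]
  | cons c rest ih =>
    have hc := key_char c (hl c (List.mem_cons_self ..))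
    by_cases ha : PySem.Chars.isalpha c = true
    · rw [if_pos ha] at hc
      have ht : (String.ofList [t9Sub c]).toList = [t9Sub c] := String.toList_ofList
      simp only [t9LoopA, hc, ht,
                 ih (fun x hx => hl x (List.mem_cons_of_mem _ hx)) (acc ++ [t9Sub c]),
                 List.all_cons, ha, Bool.true_and, List.map_cons, List.append_assoc,
                 List.cons_append, List.nil_append]
    · have ha' : PySem.Chars.isalpha c = false := by
        cases h : PySem.Chars.isalpha c
        · rfl
        · exact absurd h ha
      rw [if_neg (by simp [ha'])] at hc
      simp [t9LoopA, hc, ha']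

-- ===== VERDICT (by name: the statement is the Claim_ definition above) =====
theorem word_to_t9_sequence_spec : Claim_equal_word_to_t9_sequence := by
  intro word _
  unfold Spec_word_to_t9_sequence word_to_t9_sequence word_to_t9_sequence_alt
  have hfix : ∀ x ∈ PySem.Chars.lower word.toList, PySem.Chars.lowerChar x = x := by
    intro x hx
    simp only [PySem.Chars.lower, List.mem_map] at hx
    obtain ⟨y, _, rfl⟩ := hx
    exact lowerChar_idem y
  rw [loopA_eq _ hfix [], outer_fold]
  have hall : (PySem.Chars.lower word.toList).all PySem.Chars.isalpha
              = word.toList.all PySem.Chars.isalpha := by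
    unfold PySem.Chars.lower
    rw [List.all_map]
    simp only [Function.comp_def, isalpha_lowerChar]
  rw [hall]
  by_cases hA : word.toList.all PySem.Chars.isalpha = true
  · rw [hA]
    have hsa : PySem.Chars.strIsalpha word.toList = !word.toList.isEmpty := by
      unfold PySem.Chars.strIsalpha
      rw [hA]
      simp
    rw [hsa]
    have hcond : (!word.toList.isEmpty && !(!word.toList.isEmpty)) = false := by
      cases word.toList.isEmpty <;> rfl
    rw [hcond]
    simp only [if_true, Bool.false_eq_true, if_false]
    rfl
  · have hA' : word.toList.all PySem.Chars.isalpha = false := by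
      cases h : word.toList.all PySem.Chars.isalpha
      · rfl
      · exact absurd h hA
    have hne : word.toList.isEmpty = false := by
      cases h : word.toList.isEmpty
      · rfl
      · exfalso
        rw [List.isEmpty_iff] at h
        rw [h] at hA'
        simp at hA'
    have hsa : PySem.Chars.strIsalpha word.toList = false := by
      unfold PySem.Chars.strIsalpha
      rw [hA']
      simp
    rw [hA', hsa, hne]
    simp
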